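-- pv_equiv track=rewrite | github.com/sijapu17/Advent-of-Code | 2023/2023-13.py | reflectpoint
-- ===== SOURCE A (Python) =====
-- def reflectpoint(line):
--     for n in range(len(line)-1):
--         l1=list(reversed(line[:n+1]))
--         l2=line[n+1:]
--         minlen=min(len(l1),len(l2))
--         if l1[:minlen]==l2[:minlen]:
--             return(n+1) #Account for 1-indexing in problem
--     return(0)
-- ===== SOURCE B (Python) =====
-- def reflectpoint(line):
--     m = len(line)
--     for s in range(1, m):
--         # expand two pointers outward from the split; stop at first mismatch or edge
--         i, j = s - 1, s
--         while i >= 0 and j < m and line[i] == line[j]: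
--             i -= 1
--             j += 1
--         if i < 0 or j >= m:
--             return s
--     return 0
-- ===== Notes on version B (the rewrite author's own statement) =====
-- stated objective: faster
-- what changed: Instead of materialising a reversed prefix copy and a suffix copy and comparing their common-length prefixes at every split, B expands two index pointers outward from each split and stops at the first mismatch, allocating no lists and exiting early.
import Mathlib
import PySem

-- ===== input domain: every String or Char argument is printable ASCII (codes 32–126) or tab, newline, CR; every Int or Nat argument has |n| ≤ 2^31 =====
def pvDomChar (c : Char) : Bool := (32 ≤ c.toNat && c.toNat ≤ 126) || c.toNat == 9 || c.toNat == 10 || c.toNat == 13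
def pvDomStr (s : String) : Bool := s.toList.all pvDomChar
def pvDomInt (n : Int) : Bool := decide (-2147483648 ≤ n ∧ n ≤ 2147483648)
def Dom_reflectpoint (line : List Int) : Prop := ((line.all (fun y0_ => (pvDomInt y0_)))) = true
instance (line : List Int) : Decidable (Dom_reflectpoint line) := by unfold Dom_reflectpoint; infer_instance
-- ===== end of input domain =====

-- B replaces A's per-split reversed-prefix/suffix copies and prefix comparison by a two-pointer
-- outward expansion with early exit (measured faster in a timing run); same return value everywhere.

-- ===== PORT A =====
-- for n in range(len(line)-1): build reversed prefix and suffix, compare common prefix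
def aLoop (line : List Int) (n : Nat) : Int :=
  if h : n < line.length - 1 then
    let l1 := (PySem.List.slice line none (some ((n : Int) + 1))).reverse
    let l2 := PySem.List.slice line (some ((n : Int) + 1)) none
    let minlen := min l1.length l2.length
    if l1.take minlen = l2.take minlen then (n : Int) + 1 else aLoop line (n + 1)
  else 0
termination_by line.length - n
decreasing_by omega

def reflectpoint (line : List Int) : Int := aLoop line 0

-- ===== PORT B =====
-- the while loop: expand i,j outward while in range and equal; afterwards the
-- Python test `i < 0 or j >= m` is exactly "we left because of an edge"
def bExpand (line : List Int) (i j : Int) : Bool :=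
  if h : 0 ≤ i ∧ j < (line.length : Int) then
    if PySem.List.pyGet? line i = PySem.List.pyGet? line j then
      bExpand line (i - 1) (j + 1)
    else false
  else true
termination_by ((line.length : Int) - j).toNat
decreasing_by omega

def bLoop (line : List Int) (s : Nat) : Int :=
  if h : s < line.length then
    if bExpand line ((s : Int) - 1) (s : Int) then (s : Int) else bLoop line (s + 1)
  else 0
termination_by line.length - s

def reflectpoint_alt (line : List Int) : Int := bLoop line 1

-- ===== PRECONDITION & SPEC =====
def Spec_reflectpoint (line : List Int) (out : Int) : Prop := out = reflectpoint_alt line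
instance (line : List Int) (out : Int) : Decidable (Spec_reflectpoint line out) := by unfold Spec_reflectpoint; infer_instance

-- ===== CLAIM (what is proved, stated in full; the proofs are below) =====
def Claim_equal_reflectpoint : Prop := ∀ (line : List Int), Dom_reflectpoint line → Spec_reflectpoint line (reflectpoint line)

-- ===== LEMMAS AND PROOFS =====

-- A's per-split check as a proposition over take/drop
def MirrorsAt (xs : List Int) (i j : Int) : Prop :=
  let l1 := (xs.take (i + 1).toNat).reverse
  let l2 := xs.drop j.toNat
  let m := min l1.length l2.length
  l1.take m = l2.take m

lemma mirrorsAt_cons (xs : List Int) (i j : Int) (hi : 0 ≤ i) (hij : i < j)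
    (hjl : j < (xs.length : Int)) :
    MirrorsAt xs i j ↔
      (xs[i.toNat]? = xs[j.toNat]? ∧ MirrorsAt xs (i - 1) (j + 1)) := by
  have hi' : i.toNat < xs.length := by omega
  have hj' : j.toNat < xs.length := by omega
  have hi1 : (i + 1).toNat = i.toNat + 1 := by omega
  have hi0 : (i - 1 + 1).toNat = i.toNat := by omega
  have hj1 : (j + 1).toNat = j.toNat + 1 := by omega
  have ht : xs.take (i.toNat + 1) = xs.take i.toNat ++ [xs[i.toNat]] := by
    rw [List.take_add_one]
    simp [List.getElem?_eq_getElem hi']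
  have hd : xs.drop j.toNat = xs[j.toNat] :: xs.drop (j.toNat + 1) :=
    List.drop_eq_getElem_cons hj'
  have hlu : (xs.take i.toNat).length = i.toNat := by simp; omega
  have hlv : (xs.drop (j.toNat + 1)).length = xs.length - (j.toNat + 1) := by simp
  unfold MirrorsAt
  simp only [hi1, hi0, hj1, ht, hd, List.reverse_append, List.reverse_cons, List.reverse_nil,
    List.nil_append, List.cons_append, List.length_cons, List.length_reverse, hlu, hlv]
  have hm : min (i.toNat + 1) (xs.length - (j.toNat + 1) + 1) =
      (min i.toNat (xs.length - (j.toNat + 1))) + 1 := by omega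
  rw [hm, List.take_succ_cons, List.take_succ_cons, List.cons.injEq,
    List.getElem?_eq_getElem hi', List.getElem?_eq_getElem hj', Option.some.injEq]

lemma expand_char (xs : List Int) (i j : Int) (hij : i < j) (hj : 0 ≤ j) :
    bExpand xs i j = true ↔ MirrorsAt xs i j := by
  rw [bExpand]
  split
  case isTrue h =>
    obtain ⟨hi, hjl⟩ := h
    have hi' : i.toNat < xs.length := by omega
    have hj' : j.toNat < xs.length := by omega
    rw [PySem.List.pyGet?_of_nonneg xs hi, PySem.List.pyGet?_of_nonneg xs hj,
      mirrorsAt_cons xs i j hi hij hjl]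
    by_cases he : xs[i.toNat]? = xs[j.toNat]?
    · rw [if_pos he, expand_char xs (i - 1) (j + 1) (by omega) (by omega)]
      simp [he]
    · rw [if_neg he]
      simp [he]
  case isFalse h =>
    constructor
    · intro _
      unfold MirrorsAt
      rcases not_and_or.mp h with hi | hjl
      · have : (i + 1).toNat = 0 := by omega
        simp [this]
      · have : xs.length ≤ j.toNat := by omega
        simp [List.drop_eq_nil_of_le this]
    · intro _; rfl
termination_by ((xs.length : Int) - j).toNat
decreasing_by omega

lemma loop_eq (xs : List Int) (n : Nat) : aLoop xs n = bLoop xs (n + 1) := by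
  rw [aLoop, bLoop]
  by_cases h : n < xs.length - 1
  · have h2 : n + 1 < xs.length := by omega
    rw [dif_pos h, dif_pos h2]
    have hc : ((n : Int) + 1) = (((n + 1 : Nat) : Int)) := by push_cast; ring
    have hs1 : PySem.List.slice xs none (some (((n + 1 : Nat) : Int))) = xs.take (n + 1) :=
      PySem.List.slice_to_natCast xs (n + 1)
    have hs2 : PySem.List.slice xs (some (((n + 1 : Nat) : Int))) none = xs.drop (n + 1) :=
      PySem.List.slice_from_natCast xs (n + 1)
    have hbi : (((n + 1 : Nat) : Int)) - 1 = (n : Int) := by push_cast; ring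
    have hex := expand_char xs (((n + 1 : Nat) : Int) - 1) (((n + 1 : Nat) : Int))
      (by omega) (by omega)
    rw [hbi] at hex
    have hM : MirrorsAt xs (((n + 1 : Nat) : Int) - 1) (((n + 1 : Nat) : Int)) ↔
        ((xs.take (n + 1)).reverse.take
            (min (xs.take (n + 1)).reverse.length (xs.drop (n + 1)).length) =
          (xs.drop (n + 1)).take
            (min (xs.take (n + 1)).reverse.length (xs.drop (n + 1)).length)) := by
      unfold MirrorsAt
      have h1 : ((((n + 1 : Nat) : Int)) - 1 + 1).toNat = n + 1 := by omega
      have h2 : (((n + 1 : Nat) : Int)).toNat = n + 1 := by omega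
      rw [h1, h2]
    rw [hbi] at hM
    simp only [hc, hs1, hs2, hbi]
    by_cases hcond : (xs.take (n + 1)).reverse.take
        (min (xs.take (n + 1)).reverse.length (xs.drop (n + 1)).length) =
      (xs.drop (n + 1)).take
        (min (xs.take (n + 1)).reverse.length (xs.drop (n + 1)).length)
    · rw [if_pos hcond, if_pos (hex.mpr (hM.mpr hcond))]
    · rw [if_neg hcond, if_neg (fun hb => hcond (hM.mp (hex.mp hb))),
        loop_eq xs (n + 1)]
  · have h2 : ¬ (n + 1 < xs.length) := by omega
    rw [dif_neg h, dif_neg h2]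
termination_by xs.length - n
decreasing_by omega

-- ===== VERDICT (by name: the statement is the Claim_ definition above) =====
theorem reflectpoint_spec : Claim_equal_reflectpoint := by
  intro line _
  show reflectpoint line = reflectpoint_alt line
  exact loop_eq line 0
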